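-- pv_equiv track=rewrite | github.com/AlizeeChen11/xpu-perf | projects/xpu_oj/llm_sim/engine.py | _ordered_result_csv_keys
-- ===== SOURCE A (Python) =====
-- from typing import Dict, List, Union, Optional, Any
--
-- def _ordered_result_csv_keys(flat_rows: List[Dict]) -> List[str]:
--     """CSV 列顺序：主字段固定在前；arguments.*、targets.* 按各行 dict 迭代中首次出现的顺序，不做字母序重排。"""
--     if not flat_rows:
--         return []
--     ordered: List[str] = []
--     seen: set = set()
--     for k in ("sku_name", "op_name", "provider"):
--         if any(k in row for row in flat_rows):
--             ordered.append(k)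
--             seen.add(k)
--     for row in flat_rows:
--         for k in row:
--             if k in seen or not k.startswith("arguments."):
--                 continue
--             ordered.append(k)
--             seen.add(k)
--     for row in flat_rows:
--         for k in row:
--             if k in seen or not k.startswith("targets."):
--                 continue
--             ordered.append(k)
--             seen.add(k)
--     for row in flat_rows:
--         for k in row:
--             if k not in seen:
--                 ordered.append(k)
--                 seen.add(k)
--     return ordered
-- ===== SOURCE B (Python) =====
-- from typing import Dict, List
--
-- _MAIN = ("sku_name", "op_name", "provider")
--
-- def _ordered_result_csv_keys(flat_rows: List[Dict]) -> List[str]: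
--     """One pass: bucket each new key into arguments/targets/other; main fields
--     tracked as presence flags and emitted first in fixed order."""
--     present = {m: False for m in _MAIN}
--     args: List[str] = []
--     targs: List[str] = []
--     others: List[str] = []
--     seen: set = set()
--     for row in flat_rows:
--         for k in row:
--             if k in present:
--                 present[k] = True
--             elif k not in seen:
--                 seen.add(k)
--                 if k.startswith("arguments."):
--                     args.append(k)
--                 elif k.startswith("targets."):
--                     targs.append(k)
--                 else:
--                     others.append(k)
--     return [m for m in _MAIN if present[m]] + args + targs + others
-- ===== Notes on version B (the rewrite author's own statement) =====
-- stated objective: simpler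
-- what changed: A makes a main-field probe plus three further full scans over all rows (one per key category, each re-checking a shared seen set); B makes a single pass that buckets each new key into arguments/targets/other lists and records main-field presence flags, then concatenates.
import Mathlib
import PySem

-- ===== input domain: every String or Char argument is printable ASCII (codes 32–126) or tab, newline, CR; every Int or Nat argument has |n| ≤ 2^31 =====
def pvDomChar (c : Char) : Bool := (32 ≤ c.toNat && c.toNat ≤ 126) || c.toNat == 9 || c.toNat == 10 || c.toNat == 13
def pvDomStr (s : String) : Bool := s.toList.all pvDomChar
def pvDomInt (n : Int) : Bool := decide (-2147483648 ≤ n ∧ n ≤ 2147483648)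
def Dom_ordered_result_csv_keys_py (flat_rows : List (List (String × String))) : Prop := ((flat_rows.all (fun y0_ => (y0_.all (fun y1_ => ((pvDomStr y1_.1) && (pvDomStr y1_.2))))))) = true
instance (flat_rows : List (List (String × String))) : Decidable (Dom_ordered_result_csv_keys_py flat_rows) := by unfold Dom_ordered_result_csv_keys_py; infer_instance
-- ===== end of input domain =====

-- B replaces A's four sequential scans over the rows by one bucketing pass; same return value, no mutation.

-- ===== PORT A =====
-- a row is a Python dict given as an association list; iterating its keys = first occurrences in order
def pvRowKeys (row : List (String × String)) : List String := PySem.List.dedup (row.map Prod.fst)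

def ordered_result_csv_keys_py (flat_rows : List (List (String × String))) : List String :=
  if flat_rows.isEmpty then []
  else
    let s0 : List String × PySem.Set String :=
      ["sku_name", "op_name", "provider"].foldl
        (fun st k =>
          if flat_rows.any (fun row => (pvRowKeys row).contains k) then
            (st.1 ++ [k], PySem.Set.add st.2 k)
          else st)
        ([], PySem.Set.empty)
    let s1 := flat_rows.foldl (fun st row => (pvRowKeys row).foldl
        (fun st k => if PySem.Set.contains st.2 k || !(PySem.Str.startswith k "arguments.") then st
                     else (st.1 ++ [k], PySem.Set.add st.2 k)) st) s0
    let s2 := flat_rows.foldl (fun st row => (pvRowKeys row).foldl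
        (fun st k => if PySem.Set.contains st.2 k || !(PySem.Str.startswith k "targets.") then st
                     else (st.1 ++ [k], PySem.Set.add st.2 k)) st) s1
    let s3 := flat_rows.foldl (fun st row => (pvRowKeys row).foldl
        (fun st k => if PySem.Set.contains st.2 k then st
                     else (st.1 ++ [k], PySem.Set.add st.2 k)) st) s2
    s3.1

-- ===== PORT B =====
structure PvBState where
  sku : Bool
  op : Bool
  prov : Bool
  args : List String
  targs : List String
  others : List String
  seen : PySem.Set String
deriving Repr

def pvBStep (st : PvBState) (k : String) : PvBState :=
  if k == "sku_name" then { st with sku := true }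
  else if k == "op_name" then { st with op := true }
  else if k == "provider" then { st with prov := true }
  else if PySem.Set.contains st.seen k then st
  else if PySem.Str.startswith k "arguments." then
    { st with seen := PySem.Set.add st.seen k, args := st.args ++ [k] }
  else if PySem.Str.startswith k "targets." then
    { st with seen := PySem.Set.add st.seen k, targs := st.targs ++ [k] }
  else
    { st with seen := PySem.Set.add st.seen k, others := st.others ++ [k] }

def ordered_result_csv_keys_py_alt (flat_rows : List (List (String × String))) : List String :=
  let st := flat_rows.foldl (fun st row => (pvRowKeys row).foldl pvBStep st)
      ⟨false, false, false, [], [], [], PySem.Set.empty⟩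
  ((if st.sku then ["sku_name"] else []) ++ (if st.op then ["op_name"] else []) ++
   (if st.prov then ["provider"] else [])) ++ st.args ++ st.targs ++ st.others

-- ===== PRECONDITION & SPEC =====
def Spec_ordered_result_csv_keys_py (flat_rows : List (List (String × String))) (out : List String) : Prop := out = ordered_result_csv_keys_py_alt flat_rows
instance (flat_rows : List (List (String × String))) (out : List String) : Decidable (Spec_ordered_result_csv_keys_py flat_rows out) := by unfold Spec_ordered_result_csv_keys_py; infer_instance

-- ===== CLAIM (what is proved, stated in full; the proofs are below) =====
def Claim_equal_ordered_result_csv_keys_py : Prop := ∀ (flat_rows : List (List (String × String))), Dom_ordered_result_csv_keys_py flat_rows → Spec_ordered_result_csv_keys_py flat_rows (ordered_result_csv_keys_py flat_rows)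

-- ===== LEMMAS AND PROOFS =====

-- key-classification predicates used by the proofs
def pvIsMain (k : String) : Bool := k == "sku_name" || k == "op_name" || k == "provider"
def pvArgP (k : String) : Bool := !pvIsMain k && PySem.Str.startswith k "arguments."
def pvTargP (k : String) : Bool := !pvIsMain k && !PySem.Str.startswith k "arguments." && PySem.Str.startswith k "targets."
def pvOtherP (k : String) : Bool := !pvIsMain k && !PySem.Str.startswith k "arguments." && !PySem.Str.startswith k "targets."

-- the keys a seen-guarded scan picks, and the seen set it leaves behind
def pvPick (p : String → Bool) (s : PySem.Set String) : List String → List String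
  | [] => []
  | k :: ks => if PySem.Set.contains s k || !p k then pvPick p s ks else k :: pvPick p (PySem.Set.add s k) ks

def pvPickSeen (p : String → Bool) (s : PySem.Set String) : List String → PySem.Set String
  | [] => s
  | k :: ks => if PySem.Set.contains s k || !p k then pvPickSeen p s ks else pvPickSeen p (PySem.Set.add s k) ks

lemma pv_cond_true {p : String → Bool} {s : PySem.Set String} {k : String}
    (h : k ∈ s ∨ p k = false) : (PySem.Set.contains s k || !p k) = true := by
  rcases h with h | h <;> simp [PySem.Set.contains, h]

lemma pv_cond_false {p : String → Bool} {s : PySem.Set String} {k : String}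
    (h1 : k ∉ s) (h2 : p k = true) : (PySem.Set.contains s k || !p k) = false := by
  simp [PySem.Set.contains, h1, h2]

lemma pv_pick_skip (p : String → Bool) (s : PySem.Set String) (k : String) (ks : List String)
    (h : k ∈ s ∨ p k = false) : pvPick p s (k :: ks) = pvPick p s ks := by
  simp only [pvPick, pv_cond_true h, if_true]

lemma pv_pick_take (p : String → Bool) (s : PySem.Set String) (k : String) (ks : List String)
    (h1 : k ∉ s) (h2 : p k = true) :
    pvPick p s (k :: ks) = k :: pvPick p (PySem.Set.add s k) ks := by
  simp only [pvPick, pv_cond_false h1 h2, Bool.false_eq_true, if_false]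

lemma pv_pickSeen_skip (p : String → Bool) (s : PySem.Set String) (k : String) (ks : List String)
    (h : k ∈ s ∨ p k = false) : pvPickSeen p s (k :: ks) = pvPickSeen p s ks := by
  simp only [pvPickSeen, pv_cond_true h, if_true]

lemma pv_pickSeen_take (p : String → Bool) (s : PySem.Set String) (k : String) (ks : List String)
    (h1 : k ∉ s) (h2 : p k = true) :
    pvPickSeen p s (k :: ks) = pvPickSeen p (PySem.Set.add s k) ks := by
  simp only [pvPickSeen, pv_cond_false h1 h2, Bool.false_eq_true, if_false]

lemma pv_pick_congr (p q : String → Bool) (s t : PySem.Set String) (ks : List String)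
    (h : ∀ k ∈ ks, (k ∉ s ∧ p k = true) ↔ (k ∉ t ∧ q k = true)) :
    pvPick p s ks = pvPick q t ks := by
  induction ks generalizing s t with
  | nil => rfl
  | cons k ks ih =>
    have htail : ∀ j ∈ ks, (j ∉ s ∧ p j = true) ↔ (j ∉ t ∧ q j = true) :=
      fun j hj => h j (List.mem_cons_of_mem _ hj)
    by_cases hs : k ∈ s
    · have hskip2 : k ∈ t ∨ q k = false := by
        by_cases ht : k ∈ t
        · exact Or.inl ht
        · cases hq : q k
          · exact Or.inr rfl
          · exact absurd hs ((h k (List.mem_cons_self ..)).mpr ⟨ht, hq⟩).1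
      rw [pv_pick_skip _ _ _ _ (Or.inl hs), pv_pick_skip _ _ _ _ hskip2]
      exact ih s t htail
    · by_cases hp : p k = true
      · obtain ⟨ht, hq⟩ := (h k (List.mem_cons_self ..)).mp ⟨hs, hp⟩
        rw [pv_pick_take _ _ _ _ hs hp, pv_pick_take _ _ _ _ ht hq]
        congr 1
        apply ih
        intro j hj
        by_cases hjk : j = k
        · subst hjk; simp [PySem.Set.mem_add, hp, hq]
        · simp only [PySem.Set.mem_add]
          constructor
          · rintro ⟨hns, hpj⟩
            obtain ⟨hnt, hqj⟩ := (htail j hj).mp ⟨fun hm => hns (Or.inl hm), hpj⟩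
            exact ⟨fun hm => hm.elim hnt hjk, hqj⟩
          · rintro ⟨hnt, hqj⟩
            obtain ⟨hns, hpj⟩ := (htail j hj).mpr ⟨fun hm => hnt (Or.inl hm), hqj⟩
            exact ⟨fun hm => hm.elim hns hjk, hpj⟩
      · have hpf : p k = false := by cases hx : p k <;> simp_all
        have hskip2 : k ∈ t ∨ q k = false := by
          by_cases ht : k ∈ t
          · exact Or.inl ht
          · cases hq : q k
            · exact Or.inr rfl
            · exact absurd ((h k (List.mem_cons_self ..)).mpr ⟨ht, hq⟩).2 (by simp [hpf])
        rw [pv_pick_skip _ _ _ _ (Or.inr hpf), pv_pick_skip _ _ _ _ hskip2]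
        exact ih s t htail

lemma pv_pick_add_not (p : String → Bool) (s : PySem.Set String) (k : String) (ks : List String)
    (hp : p k = false) :
    pvPick p (PySem.Set.add s k) ks = pvPick p s ks := by
  apply pv_pick_congr
  intro j hj
  by_cases hjk : j = k
  · subst hjk; simp [hp]
  · simp [PySem.Set.mem_add, hjk]

lemma pv_mem_pickSeen (p : String → Bool) (s : PySem.Set String) (ks : List String) (j : String) :
    j ∈ pvPickSeen p s ks ↔ j ∈ s ∨ (j ∈ ks ∧ p j = true) := by
  induction ks generalizing s with
  | nil => simp [pvPickSeen]
  | cons k ks ih =>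
    by_cases hs : k ∈ s
    · rw [pv_pickSeen_skip _ _ _ _ (Or.inl hs), ih]
      by_cases hjk : j = k
      · subst hjk; simp [hs]
      · simp [List.mem_cons, hjk]
    · by_cases hp : p k = true
      · rw [pv_pickSeen_take _ _ _ _ hs hp, ih]
        simp only [PySem.Set.mem_add, List.mem_cons]
        by_cases hjk : j = k
        · subst hjk; simp [hp]
        · simp [hjk]
      · have hpf : p k = false := by cases hx : p k <;> simp_all
        rw [pv_pickSeen_skip _ _ _ _ (Or.inr hpf), ih]
        by_cases hjk : j = k
        · subst hjk; simp [List.mem_cons, hpf]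
        · simp [List.mem_cons, hjk]

lemma pv_sweep (p : String → Bool) (ks : List String) (acc : List String) (s : PySem.Set String) :
    List.foldl (fun (st : List String × PySem.Set String) k =>
        if PySem.Set.contains st.2 k || !p k then st else (st.1 ++ [k], PySem.Set.add st.2 k))
      (acc, s) ks
    = (acc ++ pvPick p s ks, pvPickSeen p s ks) := by
  induction ks generalizing acc s with
  | nil => simp [pvPick, pvPickSeen]
  | cons k ks ih =>
    rw [List.foldl_cons]
    by_cases hs : k ∈ s
    · rw [pv_pick_skip _ _ _ _ (Or.inl hs), pv_pickSeen_skip _ _ _ _ (Or.inl hs), ← ih]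
      congr 1
      simp [hs]
    · by_cases hp : p k = true
      · rw [pv_pick_take _ _ _ _ hs hp, pv_pickSeen_take _ _ _ _ hs hp]
        have hstep : (if PySem.Set.contains ((acc, s) : List String × PySem.Set String).2 k || !p k
              then ((acc, s) : List String × PySem.Set String)
              else (((acc, s) : List String × PySem.Set String).1 ++ [k],
                PySem.Set.add ((acc, s) : List String × PySem.Set String).2 k))
            = ((acc ++ [k], PySem.Set.add s k) : List String × PySem.Set String) := by
          simp [hs, hp]
        rw [hstep, ih]
        simp [List.append_assoc]
      · have hpf : p k = false := by cases hx : p k <;> simp_all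
        rw [pv_pick_skip _ _ _ _ (Or.inr hpf), pv_pickSeen_skip _ _ _ _ (Or.inr hpf), ← ih]
        congr 1
        simp [hpf]

lemma pv_sweep_true (ks : List String) (acc : List String) (s : PySem.Set String) :
    List.foldl (fun (st : List String × PySem.Set String) k =>
        if PySem.Set.contains st.2 k then st else (st.1 ++ [k], PySem.Set.add st.2 k))
      (acc, s) ks
    = (acc ++ pvPick (fun _ => true) s ks, pvPickSeen (fun _ => true) s ks) := by
  induction ks generalizing acc s with
  | nil => simp [pvPick, pvPickSeen]
  | cons k ks ih =>
    rw [List.foldl_cons]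
    by_cases hs : k ∈ s
    · rw [pv_pick_skip _ _ _ _ (Or.inl hs), pv_pickSeen_skip _ _ _ _ (Or.inl hs), ← ih]
      congr 1
      simp [hs]
    · rw [pv_pick_take _ _ _ _ hs rfl, pv_pickSeen_take _ _ _ _ hs rfl]
      have hstep : (if PySem.Set.contains ((acc, s) : List String × PySem.Set String).2 k
            then ((acc, s) : List String × PySem.Set String)
            else (((acc, s) : List String × PySem.Set String).1 ++ [k],
              PySem.Set.add ((acc, s) : List String × PySem.Set String).2 k))
          = ((acc ++ [k], PySem.Set.add s k) : List String × PySem.Set String) := by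
        simp [hs]
      rw [hstep, ih]
      simp [List.append_assoc]

lemma pv_foldl_flat {σ : Type} (f : σ → String → σ) (rows : List (List (String × String))) (init : σ) :
    List.foldl (fun st row => List.foldl f st (pvRowKeys row)) init rows
      = List.foldl f init (rows.flatMap pvRowKeys) := by
  induction rows generalizing init with
  | nil => rfl
  | cons r rs ih => simp [List.flatMap_cons, List.foldl_append, ih]

def pvMainList (c : String → Bool) : List String :=
  (if c "sku_name" then ["sku_name"] else []) ++ (if c "op_name" then ["op_name"] else []) ++
    (if c "provider" then ["provider"] else [])

lemma pv_mainLoop (c : String → Bool) :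
    (["sku_name", "op_name", "provider"].foldl
      (fun (st : List String × PySem.Set String) k =>
        if c k then (st.1 ++ [k], PySem.Set.add st.2 k) else st)
      ([], PySem.Set.empty))
    = (pvMainList c, (pvMainList c : PySem.Set String)) := by
  rcases hc1 : c "sku_name" <;> rcases hc2 : c "op_name" <;> rcases hc3 : c "provider" <;>
    simp [List.foldl, pvMainList, hc1, hc2, hc3, PySem.Set.add, PySem.Set.contains,
      PySem.Set.empty]

lemma pv_mem_mainList (c : String → Bool) (j : String) :
    j ∈ pvMainList c ↔ ((j = "sku_name" ∧ c "sku_name" = true) ∨ (j = "op_name" ∧ c "op_name" = true) ∨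
      (j = "provider" ∧ c "provider" = true)) := by
  rcases hc1 : c "sku_name" <;> rcases hc2 : c "op_name" <;> rcases hc3 : c "provider" <;>
    simp [pvMainList, hc1, hc2, hc3]

lemma pv_any_mem (flat_rows : List (List (String × String))) (m : String) :
    (flat_rows.any fun row => (pvRowKeys row).contains m)
      = decide (m ∈ flat_rows.flatMap pvRowKeys) := by
  induction flat_rows with
  | nil => rfl
  | cons r rs ih =>
    rw [List.any_cons, ih, List.flatMap_cons]
    simp [List.mem_append]

lemma pv_bRun (ks : List String) (st : PvBState) :
    ks.foldl pvBStep st =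
      ⟨st.sku || decide ("sku_name" ∈ ks), st.op || decide ("op_name" ∈ ks),
       st.prov || decide ("provider" ∈ ks),
       st.args ++ pvPick pvArgP st.seen ks, st.targs ++ pvPick pvTargP st.seen ks,
       st.others ++ pvPick pvOtherP st.seen ks,
       pvPickSeen (fun k => !pvIsMain k) st.seen ks⟩ := by
  induction ks generalizing st with
  | nil => cases st; simp [pvPick, pvPickSeen]
  | cons k ks ih =>
    by_cases h1 : k = "sku_name"
    · subst h1
      have hstep : pvBStep st "sku_name" = { st with sku := true } := by simp [pvBStep]
      rw [List.foldl_cons, hstep, ih,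
        pv_pick_skip pvArgP st.seen _ ks (Or.inr (by decide)),
        pv_pick_skip pvTargP st.seen _ ks (Or.inr (by decide)),
        pv_pick_skip pvOtherP st.seen _ ks (Or.inr (by decide)),
        pv_pickSeen_skip _ st.seen _ ks (Or.inr (by decide))]
      simp [List.mem_cons]
    · by_cases h2 : k = "op_name"
      · subst h2
        have hstep : pvBStep st "op_name" = { st with op := true } := by simp [pvBStep]
        rw [List.foldl_cons, hstep, ih,
          pv_pick_skip pvArgP st.seen _ ks (Or.inr (by decide)),
          pv_pick_skip pvTargP st.seen _ ks (Or.inr (by decide)),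
          pv_pick_skip pvOtherP st.seen _ ks (Or.inr (by decide)),
          pv_pickSeen_skip _ st.seen _ ks (Or.inr (by decide))]
        simp [List.mem_cons]
      · by_cases h3 : k = "provider"
        · subst h3
          have hstep : pvBStep st "provider" = { st with prov := true } := by simp [pvBStep]
          rw [List.foldl_cons, hstep, ih,
            pv_pick_skip pvArgP st.seen _ ks (Or.inr (by decide)),
            pv_pick_skip pvTargP st.seen _ ks (Or.inr (by decide)),
            pv_pick_skip pvOtherP st.seen _ ks (Or.inr (by decide)),
            pv_pickSeen_skip _ st.seen _ ks (Or.inr (by decide))]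
          simp [List.mem_cons]
        · have hb1 : (k == "sku_name") = false := by simp [h1]
          have hb2 : (k == "op_name") = false := by simp [h2]
          have hb3 : (k == "provider") = false := by simp [h3]
          have hn1 : ¬ ("sku_name" = k) := fun h => h1 h.symm
          have hn2 : ¬ ("op_name" = k) := fun h => h2 h.symm
          have hn3 : ¬ ("provider" = k) := fun h => h3 h.symm
          have hmain : pvIsMain k = false := by simp [pvIsMain, hb1, hb2, hb3]
          have hnm : (fun j => !pvIsMain j) k = true := by simp [hmain]
          by_cases hseen : k ∈ st.seen
          · have hstep : pvBStep st k = st := by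
              simp only [pvBStep, hb1, hb2, hb3, Bool.false_eq_true, if_false]
              simp [PySem.Set.contains, hseen]
            rw [List.foldl_cons, hstep, ih,
              pv_pick_skip pvArgP st.seen _ ks (Or.inl hseen),
              pv_pick_skip pvTargP st.seen _ ks (Or.inl hseen),
              pv_pick_skip pvOtherP st.seen _ ks (Or.inl hseen),
              pv_pickSeen_skip _ st.seen _ ks (Or.inl hseen)]
            simp [List.mem_cons, hn1, hn2, hn3]
          · have hsf : PySem.Set.contains st.seen k = false := by
              simp [PySem.Set.contains, hseen]
            by_cases harg : PySem.Str.startswith k "arguments." = true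
            · have hstep : pvBStep st k =
                  { st with seen := PySem.Set.add st.seen k, args := st.args ++ [k] } := by
                simp only [pvBStep, hb1, hb2, hb3, hsf, harg, Bool.false_eq_true, if_false,
                  if_true]
              have hA : pvArgP k = true := by
                simp only [pvArgP, hmain, Bool.not_false, Bool.true_and]; exact harg
              have hT : pvTargP k = false := by
                simp only [pvTargP, harg, Bool.not_true, Bool.and_false, Bool.false_and]
              have hO : pvOtherP k = false := by
                simp only [pvOtherP, harg, Bool.not_true, Bool.and_false, Bool.false_and]
              rw [List.foldl_cons, hstep, ih,
                pv_pick_take pvArgP st.seen _ ks hseen hA,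
                pv_pick_skip pvTargP st.seen _ ks (Or.inr hT),
                pv_pick_skip pvOtherP st.seen _ ks (Or.inr hO),
                pv_pickSeen_take _ st.seen _ ks hseen hnm,
                pv_pick_add_not pvTargP st.seen _ ks hT,
                pv_pick_add_not pvOtherP st.seen _ ks hO]
              simp [List.mem_cons, hn1, hn2, hn3, List.append_assoc]
            · have hargf : PySem.Str.startswith k "arguments." = false := by
                cases hx : PySem.Str.startswith k "arguments." <;> simp_all
              by_cases htarg : PySem.Str.startswith k "targets." = true
              · have hstep : pvBStep st k =
                    { st with seen := PySem.Set.add st.seen k, targs := st.targs ++ [k] } := by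
                  simp only [pvBStep, hb1, hb2, hb3, hsf, hargf, htarg, Bool.false_eq_true,
                    if_false, if_true]
                have hA : pvArgP k = false := by
                  simp only [pvArgP, hargf, Bool.and_false]
                have hT : pvTargP k = true := by
                  simp only [pvTargP, hmain, hargf, Bool.not_false, Bool.true_and]; exact htarg
                have hO : pvOtherP k = false := by
                  simp only [pvOtherP, htarg, Bool.not_true, Bool.and_false]
                rw [List.foldl_cons, hstep, ih,
                  pv_pick_skip pvArgP st.seen _ ks (Or.inr hA),
                  pv_pick_take pvTargP st.seen _ ks hseen hT,
                  pv_pick_skip pvOtherP st.seen _ ks (Or.inr hO),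
                  pv_pickSeen_take _ st.seen _ ks hseen hnm,
                  pv_pick_add_not pvArgP st.seen _ ks hA,
                  pv_pick_add_not pvOtherP st.seen _ ks hO]
                simp [List.mem_cons, hn1, hn2, hn3, List.append_assoc]
              · have htargf : PySem.Str.startswith k "targets." = false := by
                  cases hx : PySem.Str.startswith k "targets." <;> simp_all
                have hstep : pvBStep st k =
                    { st with seen := PySem.Set.add st.seen k, others := st.others ++ [k] } := by
                  simp only [pvBStep, hb1, hb2, hb3, hsf, hargf, htargf, Bool.false_eq_true,
                    if_false]
                have hA : pvArgP k = false := by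
                  simp only [pvArgP, hargf, Bool.and_false]
                have hT : pvTargP k = false := by
                  simp only [pvTargP, htargf, Bool.and_false]
                have hO : pvOtherP k = true := by
                  simp only [pvOtherP, hmain, hargf, htargf, Bool.not_false, Bool.and_self]
                rw [List.foldl_cons, hstep, ih,
                  pv_pick_skip pvArgP st.seen _ ks (Or.inr hA),
                  pv_pick_skip pvTargP st.seen _ ks (Or.inr hT),
                  pv_pick_take pvOtherP st.seen _ ks hseen hO,
                  pv_pickSeen_take _ st.seen _ ks hseen hnm,
                  pv_pick_add_not pvArgP st.seen _ ks hA,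
                  pv_pick_add_not pvTargP st.seen _ ks hT]
                simp [List.mem_cons, hn1, hn2, hn3, List.append_assoc]

lemma pv_core (ks : List String) (c : String → Bool)
    (h1 : c "sku_name" = decide ("sku_name" ∈ ks))
    (h2 : c "op_name" = decide ("op_name" ∈ ks))
    (h3 : c "provider" = decide ("provider" ∈ ks)) :
    ((pvMainList c ++ pvPick (fun k => PySem.Str.startswith k "arguments.") (pvMainList c) ks)
       ++ pvPick (fun k => PySem.Str.startswith k "targets.")
            (pvPickSeen (fun k => PySem.Str.startswith k "arguments.") (pvMainList c) ks) ks)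
       ++ pvPick (fun _ => true)
            (pvPickSeen (fun k => PySem.Str.startswith k "targets.")
              (pvPickSeen (fun k => PySem.Str.startswith k "arguments.") (pvMainList c) ks) ks) ks
    = ((if decide ("sku_name" ∈ ks) then ["sku_name"] else []) ++
        (if decide ("op_name" ∈ ks) then ["op_name"] else []) ++
        (if decide ("provider" ∈ ks) then ["provider"] else []))
       ++ pvPick pvArgP PySem.Set.empty ks ++ pvPick pvTargP PySem.Set.empty ks
       ++ pvPick pvOtherP PySem.Set.empty ks := by
  have hempty : ∀ j : String, j ∉ (PySem.Set.empty : PySem.Set String) := by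
    intro j; simp [PySem.Set.empty]
  have e1 : pvPick (fun k => PySem.Str.startswith k "arguments.") (pvMainList c) ks
      = pvPick pvArgP PySem.Set.empty ks := by
    apply pv_pick_congr
    intro k hk
    by_cases hk1 : k = "sku_name"
    · subst hk1
      constructor
      · rintro ⟨-, h⟩; exact absurd h (by decide)
      · rintro ⟨-, h⟩; exact absurd h (by decide)
    · by_cases hk2 : k = "op_name"
      · subst hk2
        constructor
        · rintro ⟨-, h⟩; exact absurd h (by decide)
        · rintro ⟨-, h⟩; exact absurd h (by decide)
      · by_cases hk3 : k = "provider"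
        · subst hk3
          constructor
          · rintro ⟨-, h⟩; exact absurd h (by decide)
          · rintro ⟨-, h⟩; exact absurd h (by decide)
        · have hm : pvIsMain k = false := by simp [pvIsMain, hk1, hk2, hk3]
          have hmm : k ∉ pvMainList c := by
            rw [pv_mem_mainList]
            rintro (⟨h, -⟩ | ⟨h, -⟩ | ⟨h, -⟩)
            exacts [hk1 h, hk2 h, hk3 h]
          have hAeq : pvArgP k = PySem.Str.startswith k "arguments." := by
            simp only [pvArgP, hm, Bool.not_false, Bool.true_and]
          rw [hAeq]
          exact ⟨fun hx => ⟨hempty k, hx.2⟩, fun hx => ⟨hmm, hx.2⟩⟩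
  have e2 : pvPick (fun k => PySem.Str.startswith k "targets.")
      (pvPickSeen (fun k => PySem.Str.startswith k "arguments.") (pvMainList c) ks) ks
      = pvPick pvTargP PySem.Set.empty ks := by
    apply pv_pick_congr
    intro k hk
    by_cases hk1 : k = "sku_name"
    · subst hk1
      constructor
      · rintro ⟨-, h⟩; exact absurd h (by decide)
      · rintro ⟨-, h⟩; exact absurd h (by decide)
    · by_cases hk2 : k = "op_name"
      · subst hk2
        constructor
        · rintro ⟨-, h⟩; exact absurd h (by decide)
        · rintro ⟨-, h⟩; exact absurd h (by decide)
      · by_cases hk3 : k = "provider"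
        · subst hk3
          constructor
          · rintro ⟨-, h⟩; exact absurd h (by decide)
          · rintro ⟨-, h⟩; exact absurd h (by decide)
        · have hm : pvIsMain k = false := by simp [pvIsMain, hk1, hk2, hk3]
          have hmm : k ∉ pvMainList c := by
            rw [pv_mem_mainList]
            rintro (⟨h, -⟩ | ⟨h, -⟩ | ⟨h, -⟩)
            exacts [hk1 h, hk2 h, hk3 h]
          have hTeq : pvTargP k = true ↔ (PySem.Str.startswith k "arguments." = false ∧
              PySem.Str.startswith k "targets." = true) := by
            simp only [pvTargP, hm, Bool.not_false, Bool.true_and]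
            cases hA : PySem.Str.startswith k "arguments." <;>
              cases hT : PySem.Str.startswith k "targets." <;> simp
          constructor
          · rintro ⟨hns, hT⟩
            rw [pv_mem_pickSeen] at hns
            have hAf : PySem.Str.startswith k "arguments." = false := by
              cases hx : PySem.Str.startswith k "arguments."
              · rfl
              · exact absurd (Or.inr ⟨hk, hx⟩) hns
            exact ⟨hempty k, hTeq.mpr ⟨hAf, hT⟩⟩
          · rintro ⟨-, hT⟩
            obtain ⟨hAf, hTt⟩ := hTeq.mp hT
            refine ⟨?_, hTt⟩
            intro hmem
            rw [pv_mem_pickSeen] at hmem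
            rcases hmem with hmem | ⟨-, hsw⟩
            · exact hmm hmem
            · rw [hAf] at hsw; exact absurd hsw (by decide)
  have e3 : pvPick (fun _ => true)
      (pvPickSeen (fun k => PySem.Str.startswith k "targets.")
        (pvPickSeen (fun k => PySem.Str.startswith k "arguments.") (pvMainList c) ks) ks) ks
      = pvPick pvOtherP PySem.Set.empty ks := by
    apply pv_pick_congr
    intro k hk
    by_cases hk1 : k = "sku_name"
    · subst hk1
      constructor
      · rintro ⟨hns, -⟩
        refine absurd ?_ hns
        rw [pv_mem_pickSeen]
        left
        rw [pv_mem_pickSeen]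
        left
        rw [pv_mem_mainList]
        exact Or.inl ⟨rfl, by rw [h1]; exact decide_eq_true hk⟩
      · rintro ⟨-, h⟩; exact absurd h (by decide)
    · by_cases hk2 : k = "op_name"
      · subst hk2
        constructor
        · rintro ⟨hns, -⟩
          refine absurd ?_ hns
          rw [pv_mem_pickSeen]
          left
          rw [pv_mem_pickSeen]
          left
          rw [pv_mem_mainList]
          exact Or.inr (Or.inl ⟨rfl, by rw [h2]; exact decide_eq_true hk⟩)
        · rintro ⟨-, h⟩; exact absurd h (by decide)
      · by_cases hk3 : k = "provider"
        · subst hk3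
          constructor
          · rintro ⟨hns, -⟩
            refine absurd ?_ hns
            rw [pv_mem_pickSeen]
            left
            rw [pv_mem_pickSeen]
            left
            rw [pv_mem_mainList]
            exact Or.inr (Or.inr ⟨rfl, by rw [h3]; exact decide_eq_true hk⟩)
          · rintro ⟨-, h⟩; exact absurd h (by decide)
        · have hm : pvIsMain k = false := by simp [pvIsMain, hk1, hk2, hk3]
          have hmm : k ∉ pvMainList c := by
            rw [pv_mem_mainList]
            rintro (⟨h, -⟩ | ⟨h, -⟩ | ⟨h, -⟩)
            exacts [hk1 h, hk2 h, hk3 h]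
          have hOeq : pvOtherP k = true ↔ (PySem.Str.startswith k "arguments." = false ∧
              PySem.Str.startswith k "targets." = false) := by
            simp only [pvOtherP, hm, Bool.not_false, Bool.true_and]
            cases hA : PySem.Str.startswith k "arguments." <;>
              cases hT : PySem.Str.startswith k "targets." <;> simp
          constructor
          · rintro ⟨hns, -⟩
            rw [pv_mem_pickSeen] at hns
            have hTf : PySem.Str.startswith k "targets." = false := by
              cases hx : PySem.Str.startswith k "targets."
              · rfl
              · exact absurd (Or.inr ⟨hk, hx⟩) hns
            have hinner : k ∉ pvPickSeen (fun k => PySem.Str.startswith k "arguments.")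
                (pvMainList c) ks := fun hm' => hns (Or.inl hm')
            rw [pv_mem_pickSeen] at hinner
            have hAf : PySem.Str.startswith k "arguments." = false := by
              cases hx : PySem.Str.startswith k "arguments."
              · rfl
              · exact absurd (Or.inr ⟨hk, hx⟩) hinner
            exact ⟨hempty k, hOeq.mpr ⟨hAf, hTf⟩⟩
          · rintro ⟨-, hO⟩
            obtain ⟨hAf, hTf⟩ := hOeq.mp hO
            refine ⟨?_, rfl⟩
            intro hmem
            rw [pv_mem_pickSeen] at hmem
            rcases hmem with hmem | ⟨-, hsw⟩
            · rw [pv_mem_pickSeen] at hmem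
              rcases hmem with hmem | ⟨-, hsw⟩
              · exact hmm hmem
              · rw [hAf] at hsw; exact absurd hsw (by decide)
            · rw [hTf] at hsw; exact absurd hsw (by decide)
  rw [e1, e2, e3]
  simp [pvMainList, h1, h2, h3, List.append_assoc]

lemma pv_AB (flat_rows : List (List (String × String))) :
    ordered_result_csv_keys_py flat_rows = ordered_result_csv_keys_py_alt flat_rows := by
  by_cases hemp : flat_rows = []
  · subst hemp; rfl
  · have hne : flat_rows.isEmpty = false := by
      cases flat_rows with
      | nil => exact absurd rfl hemp
      | cons r rs => rfl
    unfold ordered_result_csv_keys_py ordered_result_csv_keys_py_alt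
    simp only [hne, Bool.false_eq_true, if_false, pv_foldl_flat]
    simp only [pv_mainLoop, pv_sweep, pv_sweep_true, pv_bRun, Bool.false_or, List.nil_append]
    exact pv_core (flat_rows.flatMap pvRowKeys)
      (fun m => flat_rows.any fun row => (pvRowKeys row).contains m)
      (pv_any_mem flat_rows "sku_name") (pv_any_mem flat_rows "op_name")
      (pv_any_mem flat_rows "provider")

-- ===== VERDICT (by name: the statement is the Claim_ definition above) =====
theorem ordered_result_csv_keys_py_spec : Claim_equal_ordered_result_csv_keys_py := by
  intro flat_rows _
  unfold Spec_ordered_result_csv_keys_py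
  exact pv_AB flat_rows
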